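-- pv_equiv track=rewrite | github.com/agambansal7/clintelligence | src/analysis/trial_scorer.py | _route_matches
-- ===== SOURCE A (Python) =====
-- def _route_matches(protocol_route: str, trial_text: str) -> bool:
--     """Check if routes match with common variations."""
--     route_synonyms = {
--         "subcutaneous": ["sc", "subq", "s.c.", "subcutaneously"],
--         "intravenous": ["iv", "i.v.", "intravenously", "infusion"],
--         "oral": ["orally", "po", "p.o.", "tablet", "capsule"],
--         "intramuscular": ["im", "i.m.", "intramuscularly"],
--     }
--
--     for standard, synonyms in route_synonyms.items():
--         if protocol_route in [standard] + synonyms: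
--             if any(s in trial_text for s in [standard] + synonyms):
--                 return True
--     return False
-- ===== SOURCE B (Python) =====
-- def _route_matches(protocol_route: str, trial_text: str) -> bool:
--     """Check if routes match with common variations."""
--     terms = [
--         ("subcutaneous", 0), ("sc", 0), ("subq", 0), ("s.c.", 0), ("subcutaneously", 0),
--         ("intravenous", 1), ("iv", 1), ("i.v.", 1), ("intravenously", 1), ("infusion", 1),
--         ("oral", 2), ("orally", 2), ("po", 2), ("p.o.", 2), ("tablet", 2), ("capsule", 2),
--         ("intramuscular", 3), ("im", 3), ("i.m.", 3), ("intramuscularly", 3),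
--     ]
--     route_gids = [gid for term, gid in terms if term == protocol_route]
--     text_gids = [gid for term, gid in terms if term in trial_text]
--     return any(g in text_gids for g in route_gids)
-- ===== Notes on version B (the rewrite author's own statement) =====
-- stated objective: alternative
-- what changed: Replaces A's nested loop over synonym groups (find the group containing the route, then scan the text for that group's members) by two independent staged passes over one flat (term, group-id) table - collect the group ids the route names and the group ids occurring in the text - and tests whether the two id lists intersect.
import Mathlib
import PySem

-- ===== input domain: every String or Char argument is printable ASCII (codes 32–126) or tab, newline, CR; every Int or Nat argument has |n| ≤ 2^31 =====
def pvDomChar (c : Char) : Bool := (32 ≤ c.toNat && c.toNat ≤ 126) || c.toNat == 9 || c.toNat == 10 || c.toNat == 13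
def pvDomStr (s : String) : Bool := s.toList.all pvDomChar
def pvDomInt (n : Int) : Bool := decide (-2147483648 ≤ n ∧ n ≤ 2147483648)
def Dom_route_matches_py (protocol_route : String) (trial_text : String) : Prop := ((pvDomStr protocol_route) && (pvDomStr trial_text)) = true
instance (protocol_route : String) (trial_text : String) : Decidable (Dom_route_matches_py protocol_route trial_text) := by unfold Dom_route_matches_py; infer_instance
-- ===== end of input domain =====

-- B replaces A's nested loop over synonym groups by two staged passes over a flat (term, group-id) table plus an intersection test; objective: alternative.

-- ===== PORT A =====
-- the route_synonyms dict of A, as an insertion-ordered association list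
def pvSynonymsA : List (String × List String) :=
  [("subcutaneous", ["sc", "subq", "s.c.", "subcutaneously"]),
   ("intravenous", ["iv", "i.v.", "intravenously", "infusion"]),
   ("oral", ["orally", "po", "p.o.", "tablet", "capsule"]),
   ("intramuscular", ["im", "i.m.", "intramuscularly"])]

-- the 'for standard, synonyms in route_synonyms.items():' loop, with early return
def pvLoopA (protocol_route : String) (trial_text : String) : List (String × List String) → Bool
  | [] => false
  | (standard, synonyms) :: rest =>
    if protocol_route ∈ [standard] ++ synonyms then
      if ([standard] ++ synonyms).any (fun s => PySem.Str.isIn s trial_text) then true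
      else pvLoopA protocol_route trial_text rest
    else pvLoopA protocol_route trial_text rest

def route_matches_py (protocol_route : String) (trial_text : String) : Bool :=
  pvLoopA protocol_route trial_text pvSynonymsA

-- ===== PORT B =====
-- the flat (term, group-id) table of Source B
def pvTermsB : List (String × Int) :=
  [("subcutaneous", 0), ("sc", 0), ("subq", 0), ("s.c.", 0), ("subcutaneously", 0),
   ("intravenous", 1), ("iv", 1), ("i.v.", 1), ("intravenously", 1), ("infusion", 1),
   ("oral", 2), ("orally", 2), ("po", 2), ("p.o.", 2), ("tablet", 2), ("capsule", 2),
   ("intramuscular", 3), ("im", 3), ("i.m.", 3), ("intramuscularly", 3)]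

def route_matches_py_alt (protocol_route : String) (trial_text : String) : Bool :=
  let route_gids := (pvTermsB.filter (fun p => p.1 == protocol_route)).map (fun p => p.2)
  let text_gids := (pvTermsB.filter (fun p => PySem.Str.isIn p.1 trial_text)).map (fun p => p.2)
  route_gids.any (fun g => text_gids.contains g)

-- ===== PRECONDITION & SPEC =====
def Spec_route_matches_py (protocol_route : String) (trial_text : String) (out : Bool) : Prop := out = route_matches_py_alt protocol_route trial_text
instance (protocol_route : String) (trial_text : String) (out : Bool) : Decidable (Spec_route_matches_py protocol_route trial_text out) := by unfold Spec_route_matches_py; infer_instance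

-- ===== CLAIM (what is proved, stated in full; the proofs are below) =====
def Claim_equal_route_matches_py : Prop := ∀ (protocol_route : String) (trial_text : String), Dom_route_matches_py protocol_route trial_text → Spec_route_matches_py protocol_route trial_text (route_matches_py protocol_route trial_text)

-- ===== LEMMAS AND PROOFS =====

theorem pv_key (pr tt : String) : route_matches_py pr tt = route_matches_py_alt pr tt := by
  by_cases h1 : pr = "subcutaneous"; · subst h1; simp [route_matches_py, route_matches_py_alt, pvLoopA, pvSynonymsA, pvTermsB]
  by_cases h2 : pr = "sc"; · subst h2; simp [route_matches_py, route_matches_py_alt, pvLoopA, pvSynonymsA, pvTermsB]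
  by_cases h3 : pr = "subq"; · subst h3; simp [route_matches_py, route_matches_py_alt, pvLoopA, pvSynonymsA, pvTermsB]
  by_cases h4 : pr = "s.c."; · subst h4; simp [route_matches_py, route_matches_py_alt, pvLoopA, pvSynonymsA, pvTermsB]
  by_cases h5 : pr = "subcutaneously"; · subst h5; simp [route_matches_py, route_matches_py_alt, pvLoopA, pvSynonymsA, pvTermsB]
  by_cases h6 : pr = "intravenous"; · subst h6; simp [route_matches_py, route_matches_py_alt, pvLoopA, pvSynonymsA, pvTermsB]
  by_cases h7 : pr = "iv"; · subst h7; simp [route_matches_py, route_matches_py_alt, pvLoopA, pvSynonymsA, pvTermsB]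
  by_cases h8 : pr = "i.v."; · subst h8; simp [route_matches_py, route_matches_py_alt, pvLoopA, pvSynonymsA, pvTermsB]
  by_cases h9 : pr = "intravenously"; · subst h9; simp [route_matches_py, route_matches_py_alt, pvLoopA, pvSynonymsA, pvTermsB]
  by_cases h10 : pr = "infusion"; · subst h10; simp [route_matches_py, route_matches_py_alt, pvLoopA, pvSynonymsA, pvTermsB]
  by_cases h11 : pr = "oral"; · subst h11; simp [route_matches_py, route_matches_py_alt, pvLoopA, pvSynonymsA, pvTermsB]
  by_cases h12 : pr = "orally"; · subst h12; simp [route_matches_py, route_matches_py_alt, pvLoopA, pvSynonymsA, pvTermsB]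
  by_cases h13 : pr = "po"; · subst h13; simp [route_matches_py, route_matches_py_alt, pvLoopA, pvSynonymsA, pvTermsB]
  by_cases h14 : pr = "p.o."; · subst h14; simp [route_matches_py, route_matches_py_alt, pvLoopA, pvSynonymsA, pvTermsB]
  by_cases h15 : pr = "tablet"; · subst h15; simp [route_matches_py, route_matches_py_alt, pvLoopA, pvSynonymsA, pvTermsB]
  by_cases h16 : pr = "capsule"; · subst h16; simp [route_matches_py, route_matches_py_alt, pvLoopA, pvSynonymsA, pvTermsB]
  by_cases h17 : pr = "intramuscular"; · subst h17; simp [route_matches_py, route_matches_py_alt, pvLoopA, pvSynonymsA, pvTermsB]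
  by_cases h18 : pr = "im"; · subst h18; simp [route_matches_py, route_matches_py_alt, pvLoopA, pvSynonymsA, pvTermsB]
  by_cases h19 : pr = "i.m."; · subst h19; simp [route_matches_py, route_matches_py_alt, pvLoopA, pvSynonymsA, pvTermsB]
  by_cases h20 : pr = "intramuscularly"; · subst h20; simp [route_matches_py, route_matches_py_alt, pvLoopA, pvSynonymsA, pvTermsB]
  simp [route_matches_py, route_matches_py_alt, pvLoopA, pvSynonymsA, pvTermsB,
        h1, h2, h3, h4, h5, h6, h7, h8, h9, h10, h11, h12, h13, h14, h15, h16, h17, h18, h19, h20,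
        Ne.symm h1, Ne.symm h2, Ne.symm h3, Ne.symm h4, Ne.symm h5, Ne.symm h6, Ne.symm h7,
        Ne.symm h8, Ne.symm h9, Ne.symm h10, Ne.symm h11, Ne.symm h12, Ne.symm h13, Ne.symm h14,
        Ne.symm h15, Ne.symm h16, Ne.symm h17, Ne.symm h18, Ne.symm h19, Ne.symm h20]

-- ===== VERDICT (by name: the statement is the Claim_ definition above) =====
theorem route_matches_py_spec : Claim_equal_route_matches_py := by
  intro pr tt _
  exact pv_key pr tt
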